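-- pv_equiv track=rewrite | github.com/takingstock/CodeSapper | code_db/python/real_time_application_streamlined.py | monthInValue
-- ===== SOURCE A (Python) =====
-- months = [
--     "january", "february", "march", "april", \
--     "may", "june", "july", "august", \
--     "september", "october", "november", "december"
--     ]
--
-- months_short = [
--     "jan", "feb", "mar", "apr", \
--     "may", "june", "july", "aug", \
--     "sep", "oct", "nov", "dec"
--     ]
--
-- def monthInValue( txt ):
--
--     for idx, elem in enumerate( months ):
--         if elem in txt.lower(): return True, idx
--
--     for idx, elem in enumerate( months_short ):
--         for inner in txt.lower().split():
--             if inner == elem: return True, idx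
--         for inner in txt.lower().split('-'):
--             if inner == elem: return True, idx
--         for inner in txt.lower().split('/'):
--             if inner == elem: return True, idx
--
--     return False,None
-- ===== SOURCE B (Python) =====
-- months = [
--     "january", "february", "march", "april",
--     "may", "june", "july", "august",
--     "september", "october", "november", "december"
--     ]
--
-- months_short = [
--     "jan", "feb", "mar", "apr",
--     "may", "june", "july", "aug",
--     "sep", "oct", "nov", "dec"
--     ]
--
-- _SHORT_IDX = {m: i for i, m in enumerate(months_short)}
--
-- def monthInValue(txt):
--     low = txt.lower()
--     hits = [i for i, m in enumerate(months) if m in low]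
--     if hits:
--         return True, hits[0]
--     # token-driven phase: one pass over all tokens marks a presence table,
--     # then the first marked index is the answer
--     found = [False] * len(months_short)
--     for tok in low.split() + low.split('-') + low.split('/'):
--         i = _SHORT_IDX.get(tok)
--         if i is not None:
--             found[i] = True
--     for idx, f in enumerate(found):
--         if f:
--             return True, idx
--     return False, None
-- ===== Notes on version B (the rewrite author's own statement) =====
-- stated objective: faster
-- what changed: the short-name phase is inverted: instead of re-splitting the lowered text three ways for every month and scanning the tokens per month, B makes one pass over the tokens of the three splits, marking a presence table through a name-to-index dict, and returns the first marked index; the full-name phase collects matching indices by comprehension and takes the head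
import Mathlib
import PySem

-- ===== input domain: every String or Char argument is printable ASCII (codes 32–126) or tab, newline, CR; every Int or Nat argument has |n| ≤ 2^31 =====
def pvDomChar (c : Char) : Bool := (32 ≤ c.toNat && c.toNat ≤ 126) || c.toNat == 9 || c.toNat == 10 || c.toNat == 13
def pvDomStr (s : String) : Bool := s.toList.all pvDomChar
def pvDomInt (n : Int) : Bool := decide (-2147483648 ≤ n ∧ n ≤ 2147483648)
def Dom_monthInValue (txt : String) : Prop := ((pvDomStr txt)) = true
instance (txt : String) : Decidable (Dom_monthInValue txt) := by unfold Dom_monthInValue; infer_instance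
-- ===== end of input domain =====

-- B inverts the short-name phase: instead of scanning the three freshly split token
-- lists once per month, it makes one pass over the tokens, marking a presence table
-- through a name→index dict, and then returns the first marked index (objective: faster, measured).

-- s.split(sep) with the literal nonempty sep "-" / "/": split? is some there
def pvSplit (s sep : String) : List String := (PySem.Str.split? s sep).getD []

-- ===== PORT A =====
def pvMonths : List String :=
  ["january", "february", "march", "april",
   "may", "june", "july", "august",
   "september", "october", "november", "december"]

def pvMonthsShort : List String :=
  ["jan", "feb", "mar", "apr",
   "may", "june", "july", "aug",
   "sep", "oct", "nov", "dec"]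

-- 'for inner in ws: if inner == elem: return …' — the inner scan
def pvInnerHit (elem : String) : List String → Bool
  | [] => false
  | w :: ws => if w == elem then true else pvInnerHit elem ws

-- first loop: 'for idx, elem in enumerate(months): if elem in txt.lower(): return True, idx'
def pvLoopFullA (txt : String) : List (Int × String) → Option (Bool × Option Int)
  | [] => none
  | (idx, elem) :: rest =>
      if PySem.Str.isIn elem (PySem.Str.lower txt) then some (true, some idx)
      else pvLoopFullA txt rest

-- second loop: per month, the three split scans in order
def pvLoopShortA (txt : String) : List (Int × String) → Option (Bool × Option Int)
  | [] => none
  | (idx, elem) :: rest =>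
      if pvInnerHit elem (PySem.Str.split₀ (PySem.Str.lower txt)) then some (true, some idx)
      else if pvInnerHit elem (pvSplit (PySem.Str.lower txt) "-") then some (true, some idx)
      else if pvInnerHit elem (pvSplit (PySem.Str.lower txt) "/") then some (true, some idx)
      else pvLoopShortA txt rest

def monthInValue (txt : String) : Bool × Option Int :=
  match pvLoopFullA txt (PySem.List.enumerate pvMonths) with
  | some r => r
  | none =>
    match pvLoopShortA txt (PySem.List.enumerate pvMonthsShort) with
    | some r => r
    | none => (false, none)

-- ===== PORT B =====
-- _SHORT_IDX = {m: i for i, m in enumerate(months_short)}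
def pvShortIdx : PySem.Dict String Int :=
  (PySem.List.enumerate pvMonthsShort).foldl
    (fun d p => PySem.Dict.insert d p.2 p.1) PySem.Dict.empty

-- hits = [i for i, m in enumerate(months) if m in low]
def pvHitsB (low : String) : List (Int × String) → List Int
  | [] => []
  | (idx, elem) :: rest =>
      if PySem.Str.isIn elem low then idx :: pvHitsB low rest else pvHitsB low rest

-- 'for tok in …: i = _SHORT_IDX.get(tok); if i is not None: found[i] = True'
-- found[i] = True on a valid index i ≥ 0 (dict values are 0..11), so .set i.toNat is exact
def pvMark (found : List Bool) : List String → List Bool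
  | [] => found
  | t :: ts =>
      pvMark (match PySem.Dict.get? pvShortIdx t with
              | some i => found.set i.toNat true
              | none => found) ts

-- 'for idx, f in enumerate(found): if f: return True, idx'
def pvScanFound (idx : Int) : List Bool → Option Int
  | [] => none
  | f :: fs => if f then some idx else pvScanFound (idx + 1) fs

def monthInValue_alt (txt : String) : Bool × Option Int :=
  let low := PySem.Str.lower txt
  match pvHitsB low (PySem.List.enumerate pvMonths) with
  | i :: _ => (true, some i)
  | [] =>
    let toks := PySem.Str.split₀ low ++ pvSplit low "-" ++ pvSplit low "/"
    match pvScanFound 0 (pvMark (List.replicate pvMonthsShort.length false) toks) with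
    | some i => (true, some i)
    | none => (false, none)

-- ===== PRECONDITION & SPEC =====
def Spec_monthInValue (txt : String) (out : Bool × Option Int) : Prop := out = monthInValue_alt txt
instance (txt : String) (out : Bool × Option Int) : Decidable (Spec_monthInValue txt out) := by unfold Spec_monthInValue; infer_instance

-- ===== CLAIM (what is proved, stated in full; the proofs are below) =====
def Claim_equal_monthInValue : Prop := ∀ (txt : String), Dom_monthInValue txt → Spec_monthInValue txt (monthInValue txt)

-- ===== LEMMAS AND PROOFS =====

-- the dict the comprehension builds, as a literal
set_option maxHeartbeats 1000000 in
lemma pvShortIdx_eq : pvShortIdx = PySem.Dict.mk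
    [("jan", 0), ("feb", 1), ("mar", 2), ("apr", 3), ("may", 4), ("june", 5),
     ("july", 6), ("aug", 7), ("sep", 8), ("oct", 9), ("nov", 10), ("dec", 11)] := by
  decide

lemma pvInnerHit_any (elem : String) (ws : List String) :
    pvInnerHit elem ws = ws.any (fun w => w == elem) := by
  induction ws with
  | nil => rfl
  | cons w ws ih => simp only [pvInnerHit, List.any_cons, ih]; by_cases h : w == elem <;> simp [h]

-- full phase: A's first-match loop returns the head of B's comprehension
lemma pvFull_eq (txt : String) (l : List (Int × String)) :
    pvLoopFullA txt l = (pvHitsB (PySem.Str.lower txt) l).head?.map (fun i => (true, some i)) := by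
  induction l with
  | nil => rfl
  | cons p rest ih =>
    obtain ⟨idx, elem⟩ := p
    simp only [pvLoopFullA, pvHitsB]
    by_cases h : PySem.Str.isIn elem (PySem.Str.lower txt) = true
    · rw [if_pos h, if_pos h]; rfl
    · rw [if_neg h, if_neg h]; exact ih

lemma pvMark_length (ts : List String) (found : List Bool) :
    (pvMark found ts).length = found.length := by
  induction ts generalizing found with
  | nil => rfl
  | cons t ts ih =>
    simp only [pvMark]
    cases PySem.Dict.get? pvShortIdx t <;> simp [ih]

-- a successful dict lookup is one of the twelve stored pairs
lemma pvLookup_iff (t : String) (j : Int) :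
    PySem.Dict.get? pvShortIdx t = some j ↔ (t, j) ∈ pvShortIdx.items := by
  constructor
  · intro h
    simp only [PySem.Dict.get?, Option.map_eq_some_iff] at h
    obtain ⟨p, hp, hpj⟩ := h
    have hmem := List.mem_of_find?_eq_some hp
    have hpred := List.find?_some hp
    have ht : p.1 = t := by simpa using hpred
    obtain ⟨a, b⟩ := p
    simp only at ht hpj
    subst ht hpj
    exact hmem
  · intro h
    rw [pvShortIdx_eq] at h
    simp only [List.mem_cons, List.not_mem_nil, or_false, Prod.mk.injEq] at h
    rcases h with ⟨h1, h2⟩|⟨h1, h2⟩|⟨h1, h2⟩|⟨h1, h2⟩|⟨h1, h2⟩|⟨h1, h2⟩|⟨h1, h2⟩|⟨h1, h2⟩|⟨h1, h2⟩|⟨h1, h2⟩|⟨h1, h2⟩|⟨h1, h2⟩ <;>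
      subst h1 <;> subst h2 <;> decide

lemma pvShortIdx_nonneg (t : String) (j : Int) :
    PySem.Dict.get? pvShortIdx t = some j → 0 ≤ j := by
  intro h
  have hm := (pvLookup_iff t j).mp h
  rw [pvShortIdx_eq] at hm
  simp only [List.mem_cons, List.not_mem_nil, or_false, Prod.mk.injEq] at hm
  rcases hm with ⟨_, h2⟩|⟨_, h2⟩|⟨_, h2⟩|⟨_, h2⟩|⟨_, h2⟩|⟨_, h2⟩|⟨_, h2⟩|⟨_, h2⟩|⟨_, h2⟩|⟨_, h2⟩|⟨_, h2⟩|⟨_, h2⟩ <;> omega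

lemma pvMark_get (ts : List String) (found : List Bool) (i : Nat) (h : i < found.length)
    (h' : i < (pvMark found ts).length) :
    (pvMark found ts)[i] =
      (found[i] || ts.any (fun t => PySem.Dict.get? pvShortIdx t == some (i : Int))) := by
  induction ts generalizing found with
  | nil => simp [pvMark]
  | cons t ts ih =>
    cases hg : PySem.Dict.get? pvShortIdx t with
    | none =>
      simp only [pvMark, hg] at h' ⊢
      rw [ih found h h']
      simp [hg]
    | some j =>
      have hj : 0 ≤ j := pvShortIdx_nonneg t j hg
      simp only [pvMark, hg] at h' ⊢
      rw [ih (found.set j.toNat true) (by simpa using h) h']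
      simp only [List.any_cons, hg]
      by_cases hij : j.toNat = i
      · have : (some j == some (i : Int)) = true := by
          simp [beq_iff_eq]; omega
        simp [hij, this]
      · have : (some j == some (i : Int)) = false := by
          simp; omega
        simp [hij, this]

-- the presence table the token pass produces, as a map over the month list
set_option maxHeartbeats 1000000 in
lemma pvFound_eq (ts : List String) :
    pvMark (List.replicate pvMonthsShort.length false) ts =
      pvMonthsShort.map (fun m => ts.any (fun t => t == m)) := by
  apply List.ext_getElem
  · simp [pvMark_length]
  · intro i h1 h2
    rw [pvMark_get ts _ i (by simpa [pvMark_length] using h1) h1]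
    simp only [List.getElem_replicate, Bool.false_or, List.getElem_map]
    have h12 : i < 12 := by simpa [pvMark_length, pvMonthsShort] using h1
    congr 1
    funext t
    rw [Bool.eq_iff_iff]
    simp only [beq_iff_eq, pvLookup_iff]
    rw [pvShortIdx_eq]
    simp only [List.mem_cons, List.not_mem_nil, or_false, Prod.mk.injEq]
    interval_cases i <;> simp [pvMonthsShort]

-- short phase: A's month loop equals the flag scan over the presence map
lemma pvShort_eq (txt : String) (names : List String) (k : Int) :
    pvLoopShortA txt (PySem.List.enumerate names k) =
      (pvScanFound k (names.map (fun m =>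
        (PySem.Str.split₀ (PySem.Str.lower txt) ++ pvSplit (PySem.Str.lower txt) "-"
          ++ pvSplit (PySem.Str.lower txt) "/").any (fun t => t == m)))).map
        (fun i => (true, some i)) := by
  induction names generalizing k with
  | nil => simp [PySem.List.enumerate_nil, pvLoopShortA, pvScanFound]
  | cons m ms ih =>
    rw [PySem.List.enumerate_cons]
    simp only [pvLoopShortA, List.map_cons, pvScanFound, pvInnerHit_any, List.any_append]
    by_cases h1 : (PySem.Str.split₀ (PySem.Str.lower txt)).any (fun t => t == m) <;>
    by_cases h2 : (pvSplit (PySem.Str.lower txt) "-").any (fun t => t == m) <;>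
    by_cases h3 : (pvSplit (PySem.Str.lower txt) "/").any (fun t => t == m) <;>
      simp [h1, h2, h3, ih, Bool.or_assoc]

-- ===== VERDICT (by name: the statement is the Claim_ definition above) =====
theorem monthInValue_spec : Claim_equal_monthInValue := by
  intro txt _
  unfold Spec_monthInValue
  simp only [monthInValue, monthInValue_alt]
  rw [pvFull_eq, pvShort_eq, pvFound_eq]
  cases pvHitsB (PySem.Str.lower txt) (PySem.List.enumerate pvMonths) with
  | cons i rest => rfl
  | nil =>
    simp only [List.head?_nil, Option.map_none]
    cases pvScanFound 0 (pvMonthsShort.map (fun m =>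
        (PySem.Str.split₀ (PySem.Str.lower txt) ++ pvSplit (PySem.Str.lower txt) "-"
          ++ pvSplit (PySem.Str.lower txt) "/").any (fun t => t == m))) <;> rfl
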